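-- pv_equiv track=rewrite | github.com/MohammadSalek/Programming-Problems | Quera/career_days/q5.py | count_ending_spaces
-- ===== SOURCE A (Python) =====
-- def count_ending_spaces(line) -> int:
--     """Counts the ending spaces of a line (string)"""
--
--     spaces = 0
--     for i in reversed(line):
--         if i == " ":
--             spaces += 1
--         else:
--             break
--
--     return spaces
-- ===== SOURCE B (Python) =====
-- def count_ending_spaces(line) -> int:
--     """Counts the ending spaces of a line (string)"""
--     return len(line) - len(line.rstrip(" "))
-- ===== Notes on version B (the rewrite author's own statement) =====
-- stated objective: idiomatic
-- what changed: Replaces the explicit reversed-iteration counter loop with a length difference against the library rstrip restricted to the space character.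
import Mathlib
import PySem

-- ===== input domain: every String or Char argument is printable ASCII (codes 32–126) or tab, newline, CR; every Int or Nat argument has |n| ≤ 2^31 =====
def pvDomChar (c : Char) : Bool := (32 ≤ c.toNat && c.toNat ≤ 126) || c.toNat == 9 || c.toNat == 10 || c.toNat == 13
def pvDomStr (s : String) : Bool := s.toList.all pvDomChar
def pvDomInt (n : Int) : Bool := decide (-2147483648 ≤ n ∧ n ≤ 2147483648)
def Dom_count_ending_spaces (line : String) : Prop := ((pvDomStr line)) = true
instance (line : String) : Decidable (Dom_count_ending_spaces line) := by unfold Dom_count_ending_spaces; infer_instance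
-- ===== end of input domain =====

-- B replaces A's reversed-iteration counter loop with a length difference against rstrip restricted to spaces (idiomatic; same cost).


-- ===== PORT A =====
-- loop 'for i in reversed(line): if i == " ": spaces += 1 else: break'
def pvCountLoopA : List Char → Int
  | [] => 0
  | c :: rest => if c == ' ' then 1 + pvCountLoopA rest else 0

def count_ending_spaces (line : String) : Int :=
  pvCountLoopA line.toList.reverse

-- ===== PORT B =====
-- hand port of line.rstrip(" ") (strip only spaces from the right; exact for any string)
def pvRstripSpaces (cs : List Char) : List Char :=
  ((cs.reverse).dropWhile (fun c => c == ' ')).reverse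

def count_ending_spaces_alt (line : String) : Int :=
  (PySem.Str.len line : Int) - (pvRstripSpaces line.toList).length

-- ===== PRECONDITION & SPEC =====
def Spec_count_ending_spaces (line : String) (out : Int) : Prop := out = count_ending_spaces_alt line
instance (line : String) (out : Int) : Decidable (Spec_count_ending_spaces line out) := by unfold Spec_count_ending_spaces; infer_instance

-- ===== CLAIM (what is proved, stated in full; the proofs are below) =====
def Claim_equal_count_ending_spaces : Prop := ∀ (line : String), Dom_count_ending_spaces line → Spec_count_ending_spaces line (count_ending_spaces line)

-- ===== LEMMAS AND PROOFS =====

-- ===== VERDICT (by name: the statement is the Claim_ definition above) =====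
theorem pvCountLoopA_eq_takeWhile (l : List Char) :
    pvCountLoopA l = ((l.takeWhile (fun c => c == ' ')).length : Int) := by
  induction l with
  | nil => simp [pvCountLoopA]
  | cons c rest ih =>
    by_cases h : c == ' '
    · simp [pvCountLoopA, List.takeWhile, h, ih]; omega
    · simp [pvCountLoopA, List.takeWhile, h]

theorem count_ending_spaces_spec : Claim_equal_count_ending_spaces := by
  intro line _
  unfold Spec_count_ending_spaces count_ending_spaces count_ending_spaces_alt pvRstripSpaces
  rw [pvCountLoopA_eq_takeWhile]
  have h := List.takeWhile_append_dropWhile (p := fun c => c == ' ') (l := line.toList.reverse)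
  have hlen : (List.takeWhile (fun c => c == ' ') line.toList.reverse).length
      + (List.dropWhile (fun c => c == ' ') line.toList.reverse).length
      = line.length := by
    have := congrArg List.length h
    simp only [List.length_append, List.length_reverse, String.length_toList] at this
    exact this
  simp
  omega
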